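-- pv_equiv track=rewrite | github.com/DoubleLabyrinth/ctf-writeups | hackme.inndy.tw/pwn/echo2/solve.py | GetIntegerSequenceLength
-- ===== SOURCE A (Python) =====
-- def GetIntegerSequenceLength(a, b):
--     result = 0
--     boundary = 10
--     while boundary < b:
--         if boundary >= a:
--             result += (boundary - a) * (len(str(boundary)) - 1)
--             a = boundary
--         boundary *= 10
--     result += (b - a)  * len(str(a))
--     return result
-- ===== SOURCE B (Python) =====
-- def GetIntegerSequenceLength(a, b):
--     result = (b - a) * len(str(a))
--     p = 10
--     while p < b:
--         if p > a:
--             result += b - p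
--         p *= 10
--     return result
-- ===== Notes on version B (the rewrite author's own statement) =====
-- stated objective: alternative
-- what changed: A walks powers of ten mutating its lower bound and adding a digit-weighted bucket (boundary-a)*(len(str(boundary))-1) per segment; B computes the base term (b-a)*len(str(a)) once and then adds one unweighted increment (b-p) per digit boundary p in (a,b), counting how many numbers gain an extra digit at each crossing.
-- outside the precondition, e.g. on GetIntegerSequenceLength(-1, 11): A returns 13, B returns 25
import Mathlib
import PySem

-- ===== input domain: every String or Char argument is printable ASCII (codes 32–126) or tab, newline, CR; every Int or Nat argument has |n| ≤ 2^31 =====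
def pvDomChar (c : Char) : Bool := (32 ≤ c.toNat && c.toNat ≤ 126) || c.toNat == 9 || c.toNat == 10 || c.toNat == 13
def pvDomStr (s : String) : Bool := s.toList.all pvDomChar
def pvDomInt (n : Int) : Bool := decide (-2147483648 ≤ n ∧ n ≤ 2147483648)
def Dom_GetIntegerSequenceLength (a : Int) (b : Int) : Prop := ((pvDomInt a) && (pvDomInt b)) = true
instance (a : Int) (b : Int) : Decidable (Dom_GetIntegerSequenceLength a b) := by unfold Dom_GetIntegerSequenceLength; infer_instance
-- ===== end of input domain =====

-- B replaces A's mutating digit-weighted bucket loop by a base term (b-a)*len(str(a)) plus one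
-- unweighted increment (b-p) per power-of-ten boundary p in (a,b): an alternative decomposition, same cost.

-- ===== PORT A =====
-- len(str(n))
def pyLenStr (n : Int) : Int := PySem.Str.len (PySem.Int.toStr n)

-- the while-loop of A; `fuel` is only a totality guard: `boundary` strictly grows each
-- iteration, so (b - boundary).toNat bounds the remaining iterations and fuel never runs out
def pvAloop (b : Int) (fuel : Nat) (result a boundary : Int) : Int :=
  match fuel with
  | 0 => result + (b - a) * pyLenStr a
  | Nat.succ fuel =>
    if boundary < b then
      if a ≤ boundary then
        pvAloop b fuel (result + (boundary - a) * (pyLenStr boundary - 1)) boundary (boundary * 10)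
      else
        pvAloop b fuel result a (boundary * 10)
    else result + (b - a) * pyLenStr a

def GetIntegerSequenceLength (a : Int) (b : Int) : Int :=
  pvAloop b ((b - 10).toNat + 1) 0 a 10

-- ===== PORT B =====
-- the while-loop of B; same totality guard, `p` strictly grows each iteration
def pvBloop (b a : Int) (fuel : Nat) (result p : Int) : Int :=
  match fuel with
  | 0 => result
  | Nat.succ fuel =>
    if p < b then
      pvBloop b a fuel (if a < p then result + (b - p) else result) (p * 10)
    else result

def GetIntegerSequenceLength_alt (a : Int) (b : Int) : Int :=
  pvBloop b a ((b - 10).toNat + 1) ((b - a) * pyLenStr a) 10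

-- ===== PRECONDITION & SPEC =====
-- Pre_ excludes a < 0 with 10 < b: there len(str(·)) counts the '-' sign, so A weights the
-- segment below 10 by len(str(10))-1 = 1 (ignoring the sign) while B weights it by len(str(a))
-- (counting it); on that corner, outside the function's decimal-digit-counting purpose, both
-- totals are accidental and neither is the value anyone would specify.
def Pre_GetIntegerSequenceLength (a : Int) (b : Int) : Prop := 0 ≤ a ∨ b ≤ 10
instance (a : Int) (b : Int) : Decidable (Pre_GetIntegerSequenceLength a b) := by unfold Pre_GetIntegerSequenceLength; infer_instance
def pvWitness_GetIntegerSequenceLength : Int × Int := (3, 100)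

def Spec_GetIntegerSequenceLength (a : Int) (b : Int) (out : Int) : Prop := out = GetIntegerSequenceLength_alt a b
instance (a : Int) (b : Int) (out : Int) : Decidable (Spec_GetIntegerSequenceLength a b out) := by unfold Spec_GetIntegerSequenceLength; infer_instance

-- ===== CLAIM (what is proved, stated in full; the proofs are below) =====
def Claim_equal_GetIntegerSequenceLength : Prop := ∀ (a : Int) (b : Int), Dom_GetIntegerSequenceLength a b → Pre_GetIntegerSequenceLength a b → Spec_GetIntegerSequenceLength a b (GetIntegerSequenceLength a b)

-- ===== LEMMAS AND PROOFS =====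

-- digit count of a natural number
def pvDcount (n : Nat) : Nat :=
  if n < 10 then 1 else pvDcount (n / 10) + 1
termination_by n
decreasing_by omega

lemma pv_toDigitsCore_len : ∀ (f n : Nat) (l : List Char), n < f →
    (Nat.toDigitsCore 10 f n l).length = pvDcount n + l.length := by
  intro f
  induction f with
  | zero => omega
  | succ f ih =>
    intro n l hn
    rw [Nat.toDigitsCore]
    by_cases h : n / 10 = 0
    · rw [if_pos h, pvDcount, if_pos (by omega)]
      simp only [List.length_cons]
      omega
    · have h10 : 10 ≤ n := by
        rcases Nat.lt_or_ge n 10 with hg | hg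
        · exact absurd (Nat.div_eq_of_lt hg) h
        · exact hg
      have hd : pvDcount n = pvDcount (n / 10) + 1 := by
        conv_lhs => rw [pvDcount]
        rw [if_neg (by omega)]
      rw [if_neg h, ih (n / 10) _ (by omega)]
      simp only [List.length_cons]
      omega

lemma pv_pyLen_nat (n : Int) (hn : 0 ≤ n) : pyLenStr n = (pvDcount n.toNat : Int) := by
  unfold pyLenStr PySem.Str.len PySem.Int.toStr PySem.Int.toChars
  rw [if_neg (by omega), Nat.toDigits]
  simp only [String.toList_ofList]
  rw [pv_toDigitsCore_len _ _ _ (by omega)]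
  simp

lemma pv_dcount_spec : ∀ (k m : Nat), 10 ^ k ≤ m → m < 10 ^ (k + 1) → pvDcount m = k + 1 := by
  intro k
  induction k with
  | zero =>
    intro m h1 h2
    rw [pvDcount, if_pos (by simpa using h2)]
  | succ k ih =>
    intro m h1 h2
    have h10 : (10 : Nat) ^ (k + 1) = 10 ^ k * 10 := by ring
    have h10' : (10 : Nat) ^ (k + 2) = 10 ^ (k + 1) * 10 := by ring
    have hm : 10 ≤ m := le_trans (by calc (10:Nat) = 10^1 := by norm_num
                                        _ ≤ 10^(k+1) := Nat.pow_le_pow_right (by norm_num) (by omega)) h1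
    rw [pvDcount, if_neg (by omega), ih (m / 10) ?_ ?_]
    · exact (Nat.le_div_iff_mul_le (by norm_num)).mpr (by omega)
    · exact Nat.div_lt_of_lt_mul (by omega)

lemma pv_pyLen_bounds (k : Nat) (a : Int) (h1 : (10:Int) ^ k ≤ a) (h2 : a < 10 ^ (k + 1)) :
    pyLenStr a = (k : Int) + 1 := by
  have hc : ∀ j : Nat, ((10 ^ j : Nat) : Int) = 10 ^ j := by intro j; push_cast; ring
  have ha : 0 ≤ a := le_trans (by positivity) h1
  rw [pv_pyLen_nat a ha, pv_dcount_spec k a.toNat (by have := hc k; omega) (by have := hc (k+1); omega)]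
  push_cast; ring

lemma pvBloop_add (b a : Int) : ∀ (fuel : Nat) (p s r : Int),
    pvBloop b a fuel (s + r) p = s + pvBloop b a fuel r p := by
  intro fuel
  induction fuel with
  | zero => intro p s r; rfl
  | succ fuel ih =>
    intro p s r
    simp only [pvBloop]
    by_cases h : p < b
    · rw [if_pos h, if_pos h,
        show (if a < p then s + r + (b - p) else s + r)
          = s + (if a < p then r + (b - p) else r) by split_ifs <;> ring]
      exact ih (p * 10) s _
    · rw [if_neg h, if_neg h]

lemma pvBloop_congr (b : Int) : ∀ (fuel : Nat) (a a' r p : Int), 0 < p → a < p → a' < p →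
    pvBloop b a fuel r p = pvBloop b a' fuel r p := by
  intro fuel
  induction fuel with
  | zero => intro a a' r p _ _ _; rfl
  | succ fuel ih =>
    intro a a' r p hp ha ha'
    simp only [pvBloop]
    by_cases h : p < b
    · rw [if_pos h, if_pos h, if_pos ha, if_pos ha']
      exact ih a a' _ (p * 10) (by omega) (by omega) (by omega)
    · rw [if_neg h, if_neg h]

lemma pv_main (b : Int) : ∀ (fuel : Nat) (k : Nat) (a res p : Int),
    p = 10 ^ k → 1 ≤ k → 0 < p → (b - p).toNat < fuel →
    (p ≤ a ∨ pyLenStr a = (k : Int)) →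
    pvAloop b fuel res a p = res + (b - a) * pyLenStr a + pvBloop b a fuel 0 p := by
  intro fuel
  induction fuel with
  | zero => intro k a res p _ _ _ hf _; omega
  | succ fuel ih =>
    intro k a res p hpk hk hp hf hinv
    have hp1 : (1 : Int) ≤ 10 ^ k := one_le_pow₀ (by norm_num)
    have hnext : p * 10 = 10 ^ (k + 1) := by rw [hpk]; ring
    simp only [pvAloop, pvBloop]
    by_cases h : p < b
    · rw [if_pos h, if_pos h]
      have hLp : pyLenStr p = (k : Int) + 1 := by
        rw [hpk]; exact pv_pyLen_bounds k _ le_rfl (by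
          have : (10:Int) ^ (k+1) = 10 ^ k * 10 := by ring
          omega)
      by_cases hq : a ≤ p
      · rw [if_pos hq]
        rcases eq_or_lt_of_le hq with heq | hlt
        · subst heq
          rw [if_neg (lt_irrefl a)]
          rw [ih (k + 1) a _ (a * 10) hnext (by omega) (by omega) (by omega)
              (Or.inr (by rw [hLp]; push_cast; ring))]
          ring_nf
        · have hLa : pyLenStr a = (k : Int) := hinv.resolve_left (by omega)
          rw [if_pos hlt]
          rw [ih (k + 1) p _ (p * 10) hnext (by omega) (by omega) (by omega)
              (Or.inr (by rw [hLp]; push_cast; ring))]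
          rw [pvBloop_congr b fuel p a 0 (p * 10) (by omega) (by omega) (by omega)]
          rw [show (0 : Int) + (b - p) = (b - p) + 0 by ring, pvBloop_add b a fuel (p * 10) (b - p) 0]
          rw [hLa, hLp]
          ring
      · rw [if_neg hq, if_neg (by omega)]
        rw [not_le] at hq
        by_cases hbig : p * 10 ≤ a
        · exact ih (k + 1) a res (p * 10) hnext (by omega) (by omega) (by omega) (Or.inl hbig)
        · refine ih (k + 1) a res (p * 10) hnext (by omega) (by omega) (by omega) (Or.inr ?_)
          have : pyLenStr a = ((k + 1 : Nat) : Int) + 1 - 1 := by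
            rw [pv_pyLen_bounds k a (by omega) (by rw [← hnext]; omega)]
            push_cast; ring
          rw [this]; push_cast; ring
    · rw [if_neg h, if_neg h]
      ring

lemma pv_small_len (a : Int) (h0 : 0 ≤ a) (h10 : a < 10) : pyLenStr a = 1 := by
  rcases eq_or_lt_of_le h0 with h | h
  · rw [← h]; decide
  · simpa using pv_pyLen_bounds 0 a (by omega) (by norm_num; omega)

-- ===== VERDICT (by name: the statement is the Claim_ definition above) =====
theorem GetIntegerSequenceLength_spec : Claim_equal_GetIntegerSequenceLength := by
  intro a b _ hpre
  show GetIntegerSequenceLength a b = GetIntegerSequenceLength_alt a b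
  unfold GetIntegerSequenceLength GetIntegerSequenceLength_alt
  by_cases hb : 10 < b
  · have ha : 0 ≤ a := by
      rcases hpre with h | h
      · exact h
      · omega
    have hinv : (10 : Int) ≤ a ∨ pyLenStr a = ((1 : Nat) : Int) := by
      by_cases h10 : 10 ≤ a
      · exact Or.inl h10
      · exact Or.inr (by rw [pv_small_len a ha (by omega)]; norm_num)
    rw [pv_main b ((b - 10).toNat + 1) 1 a 0 10 (by norm_num) le_rfl (by norm_num) (by omega) hinv]
    rw [show (b - a) * pyLenStr a = (b - a) * pyLenStr a + 0 by ring,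
        pvBloop_add b a ((b - 10).toNat + 1) 10 ((b - a) * pyLenStr a) 0]
    ring
  · simp only [pvAloop, pvBloop]
    rw [if_neg hb, if_neg hb]
    ring
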